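-- pv_equiv track=rewrite | github.com/Jump-X-Projects/ai-data-analyst | ai_agent_tutorials/ai_data_analysis_agent/ai_data_analyst_enhanced.py | analyze_query_intent
-- ===== SOURCE A (Python) =====
-- def analyze_query_intent(query: str) -> dict:
--     """Analyze natural language query to determine required SQL components"""
--     requirements = {
--         'aggregations': set(),
--         'date_operations': set(),
--         'clauses': set(),
--         'comparisons': set(),
--         'joins': set()
--     }
--
--     # Analyze for aggregations
--     if any(word in query.lower() for word in ['average', 'mean', 'avg']):
--         requirements['aggregations'].add('avg')
--     if any(word in query.lower() for word in ['sum', 'total']):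
--         requirements['aggregations'].add('sum')
--     if any(word in query.lower() for word in ['count', 'number of', 'how many']):
--         requirements['aggregations'].add('count')
--
--     # Analyze for date operations
--     if any(word in query.lower() for word in ['date', 'month', 'year', 'day']):
--         requirements['date_operations'].update(['date_trunc', 'date_part'])
--
--     # Analyze for clauses
--     if any(word in query.lower() for word in ['group', 'by', 'category']):
--         requirements['clauses'].add('group_by')
--     if any(word in query.lower() for word in ['order', 'sort', 'highest', 'lowest']):
--         requirements['clauses'].add('order_by')
--     if any(word in query.lower() for word in ['where', 'filter', 'only', 'greater', 'less']):
--         requirements['clauses'].add('where')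
--
--     # Analyze for comparisons
--     if any(word in query.lower() for word in ['greater', 'more than', 'over']):
--         requirements['comparisons'].add('greater_than')
--     if any(word in query.lower() for word in ['less', 'under', 'below']):
--         requirements['comparisons'].add('less_than')
--
--     return requirements
-- ===== SOURCE B (Python) =====
-- # B: multi-pattern scan — find all matched keywords in one left-to-right pass over the
-- # query (testing startswith at each position), then map matched keywords to SQL components.
--
-- KEYWORDS = ['average', 'mean', 'avg', 'sum', 'total', 'count', 'number of', 'how many',
--             'date', 'month', 'year', 'day', 'group', 'by', 'category', 'order', 'sort',
--             'highest', 'lowest', 'where', 'filter', 'only', 'greater', 'less',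
--             'more than', 'over', 'under', 'below']
--
-- TAGS = [
--     ('aggregations', ['avg'], ['average', 'mean', 'avg']),
--     ('aggregations', ['sum'], ['sum', 'total']),
--     ('aggregations', ['count'], ['count', 'number of', 'how many']),
--     ('date_operations', ['date_trunc', 'date_part'], ['date', 'month', 'year', 'day']),
--     ('clauses', ['group_by'], ['group', 'by', 'category']),
--     ('clauses', ['order_by'], ['order', 'sort', 'highest', 'lowest']),
--     ('clauses', ['where'], ['where', 'filter', 'only', 'greater', 'less']),
--     ('comparisons', ['greater_than'], ['greater', 'more than', 'over']),
--     ('comparisons', ['less_than'], ['less', 'under', 'below']),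
-- ]
--
-- def analyze_query_intent(query: str) -> dict:
--     q = query.lower()
--     matched = set()
--     for i in range(len(q) + 1):
--         for kw in KEYWORDS:
--             if q.startswith(kw, i):
--                 matched.add(kw)
--     requirements = {c: set() for c in
--                     ('aggregations', 'date_operations', 'clauses', 'comparisons', 'joins')}
--     for cat, values, triggers in TAGS:
--         if any(t in matched for t in triggers):
--             requirements[cat].update(values)
--     return requirements
-- ===== Notes on version B (the rewrite author's own statement) =====
-- stated objective: alternative
-- what changed: Instead of nine per-branch any-substring tests, B matches all keywords in one positional scan of the lowered query (testing startswith at every index) to build a matched-keyword set, then derives the five requirement sets from a tag table keyed by matched keywords.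
import Mathlib
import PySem

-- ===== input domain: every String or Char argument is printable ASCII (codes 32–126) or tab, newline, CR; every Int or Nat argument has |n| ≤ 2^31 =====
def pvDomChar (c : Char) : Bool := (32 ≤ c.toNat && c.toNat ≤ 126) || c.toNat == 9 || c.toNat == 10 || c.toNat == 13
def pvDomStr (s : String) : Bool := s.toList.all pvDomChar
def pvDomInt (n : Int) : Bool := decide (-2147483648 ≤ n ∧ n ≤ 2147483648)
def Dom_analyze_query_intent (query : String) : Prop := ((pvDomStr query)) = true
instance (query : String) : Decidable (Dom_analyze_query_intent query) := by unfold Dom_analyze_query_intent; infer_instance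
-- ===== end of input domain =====

-- B replaces A's nine groups of per-keyword substring searches by a single left-to-right
-- positional scan of the query collecting the matched-keyword set, then maps matched
-- keywords to SQL components (objective: alternative algorithm, multi-pattern scan).
-- ===== PORT A =====
-- each 'if any(word in query.lower() for word in [...])' becomes a conditional Set.add/update
def analyze_query_intent (query : String) : List (String × List String) :=
  let agg0 : PySem.Set String := PySem.Set.empty
  let agg1 := if ["average", "mean", "avg"].any (fun w => PySem.Str.isIn w (PySem.Str.lower query))
              then PySem.Set.add agg0 "avg" else agg0
  let agg2 := if ["sum", "total"].any (fun w => PySem.Str.isIn w (PySem.Str.lower query))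
              then PySem.Set.add agg1 "sum" else agg1
  let agg3 := if ["count", "number of", "how many"].any (fun w => PySem.Str.isIn w (PySem.Str.lower query))
              then PySem.Set.add agg2 "count" else agg2
  let dat0 : PySem.Set String := PySem.Set.empty
  let dat1 := if ["date", "month", "year", "day"].any (fun w => PySem.Str.isIn w (PySem.Str.lower query))
              then PySem.Set.update dat0 ["date_trunc", "date_part"] else dat0
  let cl0 : PySem.Set String := PySem.Set.empty
  let cl1 := if ["group", "by", "category"].any (fun w => PySem.Str.isIn w (PySem.Str.lower query))
             then PySem.Set.add cl0 "group_by" else cl0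
  let cl2 := if ["order", "sort", "highest", "lowest"].any (fun w => PySem.Str.isIn w (PySem.Str.lower query))
             then PySem.Set.add cl1 "order_by" else cl1
  let cl3 := if ["where", "filter", "only", "greater", "less"].any (fun w => PySem.Str.isIn w (PySem.Str.lower query))
             then PySem.Set.add cl2 "where" else cl2
  let cmp0 : PySem.Set String := PySem.Set.empty
  let cmp1 := if ["greater", "more than", "over"].any (fun w => PySem.Str.isIn w (PySem.Str.lower query))
              then PySem.Set.add cmp0 "greater_than" else cmp0
  let cmp2 := if ["less", "under", "below"].any (fun w => PySem.Str.isIn w (PySem.Str.lower query))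
              then PySem.Set.add cmp1 "less_than" else cmp1
  [("aggregations", agg3), ("date_operations", dat1), ("clauses", cl3),
   ("comparisons", cmp2), ("joins", PySem.Set.empty)]

-- ===== PORT B =====
-- Source B's KEYWORDS: every keyword the scan looks for
def pvKeywords : List String :=
  ["average", "mean", "avg", "sum", "total", "count", "number of", "how many",
   "date", "month", "year", "day", "group", "by", "category", "order", "sort",
   "highest", "lowest", "where", "filter", "only", "greater", "less",
   "more than", "over", "under", "below"]

-- Source B's TAGS: (category, values to add, trigger keywords)
def pvTags : List (String × List String × List String) :=
  [("aggregations", (["avg"], ["average", "mean", "avg"])),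
   ("aggregations", (["sum"], ["sum", "total"])),
   ("aggregations", (["count"], ["count", "number of", "how many"])),
   ("date_operations", (["date_trunc", "date_part"], ["date", "month", "year", "day"])),
   ("clauses", (["group_by"], ["group", "by", "category"])),
   ("clauses", (["order_by"], ["order", "sort", "highest", "lowest"])),
   ("clauses", (["where"], ["where", "filter", "only", "greater", "less"])),
   ("comparisons", (["greater_than"], ["greater", "more than", "over"])),
   ("comparisons", (["less_than"], ["less", "under", "below"]))]

-- Source B's scanning loop: for i in range(len(q)+1): for kw in KEYWORDS: if q.startswith(kw, i).
-- Python's q.startswith(kw, i) for 0 ≤ i is exactly the prefix test on q.toList.drop i.toNat.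
def pvScan (q : String) : PySem.Set String :=
  (PySem.List.pyRange 0 (PySem.Str.len q + 1) 1).foldl
    (fun m i => pvKeywords.foldl
      (fun m kw => if PySem.Chars.startswith (q.toList.drop i.toNat) kw.toList
                   then PySem.Set.add m kw else m) m)
    PySem.Set.empty

def analyze_query_intent_alt (query : String) : List (String × List String) :=
  let q := PySem.Str.lower query
  let matched := pvScan q
  let d0 : PySem.Dict String (PySem.Set String) := PySem.Dict.ofList
    [("aggregations", PySem.Set.empty), ("date_operations", PySem.Set.empty),
     ("clauses", PySem.Set.empty), ("comparisons", PySem.Set.empty), ("joins", PySem.Set.empty)]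
  let d := pvTags.foldl (fun d r =>
    if r.2.2.any (fun t => PySem.Set.contains matched t)
    then d.modify r.1 PySem.Set.empty (fun s => PySem.Set.update s r.2.1) else d) d0
  d.items

-- ===== PRECONDITION & SPEC =====
def Spec_analyze_query_intent (query : String) (out : List (String × List String)) : Prop := out = analyze_query_intent_alt query
instance (query : String) (out : List (String × List String)) : Decidable (Spec_analyze_query_intent query out) := by unfold Spec_analyze_query_intent; infer_instance

-- ===== CLAIM (what is proved, stated in full; the proofs are below) =====
def Claim_equal_analyze_query_intent : Prop := ∀ (query : String), Dom_analyze_query_intent query → Spec_analyze_query_intent query (analyze_query_intent query)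

-- ===== LEMMAS AND PROOFS =====
-- proof-only helpers: both ports with their nine trigger tests abstracted to Bools
def pvTableA (c1 c2 c3 c4 c5 c6 c7 c8 c9 : Bool) : List (String × List String) :=
  let agg0 : PySem.Set String := PySem.Set.empty
  let agg1 := if c1 then PySem.Set.add agg0 "avg" else agg0
  let agg2 := if c2 then PySem.Set.add agg1 "sum" else agg1
  let agg3 := if c3 then PySem.Set.add agg2 "count" else agg2
  let dat0 : PySem.Set String := PySem.Set.empty
  let dat1 := if c4 then PySem.Set.update dat0 ["date_trunc", "date_part"] else dat0
  let cl0 : PySem.Set String := PySem.Set.empty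
  let cl1 := if c5 then PySem.Set.add cl0 "group_by" else cl0
  let cl2 := if c6 then PySem.Set.add cl1 "order_by" else cl1
  let cl3 := if c7 then PySem.Set.add cl2 "where" else cl2
  let cmp0 : PySem.Set String := PySem.Set.empty
  let cmp1 := if c8 then PySem.Set.add cmp0 "greater_than" else cmp0
  let cmp2 := if c9 then PySem.Set.add cmp1 "less_than" else cmp1
  [("aggregations", agg3), ("date_operations", dat1), ("clauses", cl3),
   ("comparisons", cmp2), ("joins", PySem.Set.empty)]

def pvTableB (c1 c2 c3 c4 c5 c6 c7 c8 c9 : Bool) : List (String × List String) :=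
  let d0 : PySem.Dict String (PySem.Set String) := PySem.Dict.ofList
    [("aggregations", PySem.Set.empty), ("date_operations", PySem.Set.empty),
     ("clauses", PySem.Set.empty), ("comparisons", PySem.Set.empty), ("joins", PySem.Set.empty)]
  let d1 := if c1 then d0.modify "aggregations" PySem.Set.empty (fun s => PySem.Set.update s ["avg"]) else d0
  let d2 := if c2 then d1.modify "aggregations" PySem.Set.empty (fun s => PySem.Set.update s ["sum"]) else d1
  let d3 := if c3 then d2.modify "aggregations" PySem.Set.empty (fun s => PySem.Set.update s ["count"]) else d2
  let d4 := if c4 then d3.modify "date_operations" PySem.Set.empty (fun s => PySem.Set.update s ["date_trunc", "date_part"]) else d3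
  let d5 := if c5 then d4.modify "clauses" PySem.Set.empty (fun s => PySem.Set.update s ["group_by"]) else d4
  let d6 := if c6 then d5.modify "clauses" PySem.Set.empty (fun s => PySem.Set.update s ["order_by"]) else d5
  let d7 := if c7 then d6.modify "clauses" PySem.Set.empty (fun s => PySem.Set.update s ["where"]) else d6
  let d8 := if c8 then d7.modify "comparisons" PySem.Set.empty (fun s => PySem.Set.update s ["greater_than"]) else d7
  let d9 := if c9 then d8.modify "comparisons" PySem.Set.empty (fun s => PySem.Set.update s ["less_than"]) else d8
  d9.items

set_option maxHeartbeats 1000000 in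
theorem pv_tables_eq : ∀ c1 c2 c3 c4 c5 c6 c7 c8 c9 : Bool,
    pvTableA c1 c2 c3 c4 c5 c6 c7 c8 c9 = pvTableB c1 c2 c3 c4 c5 c6 c7 c8 c9 := by
  decide

theorem pv_mem_inner (q : List Char) (l : List String) (m : PySem.Set String) (x : String) :
    x ∈ l.foldl (fun m kw => if PySem.Chars.startswith q kw.toList then PySem.Set.add m kw else m) m ↔
    x ∈ m ∨ (x ∈ l ∧ PySem.Chars.startswith q x.toList = true) := by
  induction l generalizing m with
  | nil => simp
  | cons a t ih =>
    simp only [List.foldl_cons]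
    by_cases h : PySem.Chars.startswith q a.toList = true
    · rw [if_pos h, ih]
      simp only [PySem.Set.mem_add, List.mem_cons]
      constructor
      · rintro (⟨hm | rfl⟩ | ⟨ht, hp⟩)
        · exact Or.inl hm
        · exact Or.inr ⟨Or.inl rfl, h⟩
        · exact Or.inr ⟨Or.inr ht, hp⟩
      · rintro (hm | ⟨(rfl | ht), hp⟩)
        · exact Or.inl (Or.inl hm)
        · exact Or.inl (Or.inr rfl)
        · exact Or.inr ⟨ht, hp⟩
    · rw [if_neg h, ih]
      simp only [List.mem_cons]
      constructor
      · rintro (hm | ⟨ht, hp⟩)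
        · exact Or.inl hm
        · exact Or.inr ⟨Or.inr ht, hp⟩
      · rintro (hm | ⟨(rfl | ht), hp⟩)
        · exact Or.inl hm
        · exact absurd hp h
        · exact Or.inr ⟨ht, hp⟩

theorem pv_mem_scan_fold (q : List Char) (is : List Int) (m : PySem.Set String) (x : String) :
    x ∈ is.foldl (fun m i => pvKeywords.foldl
        (fun m kw => if PySem.Chars.startswith (q.drop i.toNat) kw.toList then PySem.Set.add m kw else m) m) m ↔
    x ∈ m ∨ ∃ i ∈ is, x ∈ pvKeywords ∧ PySem.Chars.startswith (q.drop i.toNat) x.toList = true := by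
  induction is generalizing m with
  | nil => simp
  | cons a t ih =>
    simp only [List.foldl_cons]
    rw [ih, pv_mem_inner]
    simp only [List.mem_cons, exists_eq_or_imp]
    tauto

theorem pv_keywords_ne : ∀ x ∈ pvKeywords, x.toList ≠ [] := by decide

theorem pv_mem_scan (q x : String) :
    x ∈ pvScan q ↔ x ∈ pvKeywords ∧ PySem.Str.isIn x q = true := by
  unfold pvScan
  rw [pv_mem_scan_fold]
  have hempty : x ∉ (PySem.Set.empty : PySem.Set String) := by
    simp [PySem.Set.empty]
  have hiff : (∃ i ∈ PySem.List.pyRange 0 (PySem.Str.len q + 1) 1,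
      x ∈ pvKeywords ∧ PySem.Chars.startswith (q.toList.drop i.toNat) x.toList = true) ↔
      x ∈ pvKeywords ∧ PySem.Str.isIn x q = true := by
    constructor
    · rintro ⟨i, _, hk, hp⟩
      refine ⟨hk, ?_⟩
      rw [PySem.Str.isIn_iff_infix]
      rw [← PySem.Chars.isIn_iff_infix]
      exact (PySem.Chars.exists_prefix_drop_iff_isIn _ _).1
        ⟨i.toNat, (PySem.Chars.startswith_iff _ _).1 hp⟩
    · rintro ⟨hk, hin⟩
      have hinf : PySem.Chars.isIn x.toList q.toList = true := by
        rw [PySem.Chars.isIn_iff_infix]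
        exact (PySem.Str.isIn_iff_infix _ _).1 hin
      obtain ⟨j, hj⟩ := (PySem.Chars.exists_prefix_drop_iff_isIn _ _).2 hinf
      have hjle : j ≤ q.toList.length := by
        by_contra hgt
        rw [not_le] at hgt
        have : q.toList.drop j = [] := List.drop_eq_nil_of_le (le_of_lt hgt)
        rw [this] at hj
        exact pv_keywords_ne x hk (List.prefix_nil.mp hj)
      refine ⟨(j : Int), ?_, hk, (PySem.Chars.startswith_iff _ _).2 ?_⟩
      · rw [PySem.List.mem_pyRange_one]
        constructor
        · exact_mod_cast Nat.zero_le j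
        · have : PySem.Str.len q = (q.toList.length : Int) := by
            simp [PySem.Str.len]
          rw [this]
          omega
      · simpa using hj
  rw [hiff]
  tauto

theorem pv_contains_scan (q kw : String) (hk : kw ∈ pvKeywords) :
    PySem.Set.contains (pvScan q) kw = PySem.Str.isIn kw q := by
  rw [Bool.eq_iff_iff]
  have hc : PySem.Set.contains (pvScan q) kw = true ↔ kw ∈ pvScan q := by
    simp [PySem.Set.contains]
  rw [hc, pv_mem_scan]
  exact ⟨fun ⟨_, h⟩ => h, fun h => ⟨hk, h⟩⟩

theorem pv_any_eq (q : String) (ts : List String) (h : ∀ t ∈ ts, t ∈ pvKeywords) :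
    (ts.any (fun t => PySem.Set.contains (pvScan q) t)) = ts.any (fun w => PySem.Str.isIn w q) := by
  induction ts with
  | nil => rfl
  | cons a t ih =>
    simp only [List.any_cons]
    rw [pv_contains_scan q a (h a (List.mem_cons_self ..)),
        ih (fun x hx => h x (List.mem_cons_of_mem a hx))]

-- proof-only: B's phase-2 fold with the matched-set test replaced by direct substring tests
def pvRun (q : String) : List (String × List String) :=
  let d0 : PySem.Dict String (PySem.Set String) := PySem.Dict.ofList
    [("aggregations", PySem.Set.empty), ("date_operations", PySem.Set.empty),
     ("clauses", PySem.Set.empty), ("comparisons", PySem.Set.empty), ("joins", PySem.Set.empty)]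
  let d := pvTags.foldl (fun d r =>
    if r.2.2.any (fun w => PySem.Str.isIn w q) then d.modify r.1 PySem.Set.empty (fun s => PySem.Set.update s r.2.1) else d) d0
  d.items

theorem pv_tags_kw : ∀ r ∈ pvTags, ∀ t ∈ r.2.2, t ∈ pvKeywords := by decide

theorem pv_alt_eq_run (query : String) :
    analyze_query_intent_alt query = pvRun (PySem.Str.lower query) := by
  unfold analyze_query_intent_alt pvRun
  refine congrArg PySem.Dict.items (PySem.List.foldl_congr_mem _ _ _ _ ?_)
  intro acc r hr
  rw [pv_any_eq (PySem.Str.lower query) r.2.2 (pv_tags_kw r hr)]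

-- ===== VERDICT (by name: the statement is the Claim_ definition above) =====
set_option maxHeartbeats 1000000 in
theorem analyze_query_intent_spec : Claim_equal_analyze_query_intent := by
  intro query _
  show analyze_query_intent query = analyze_query_intent_alt query
  rw [pv_alt_eq_run]
  have h1 : analyze_query_intent query
      = pvTableA (["average", "mean", "avg"].any (fun w => PySem.Str.isIn w (PySem.Str.lower query)))
          (["sum", "total"].any (fun w => PySem.Str.isIn w (PySem.Str.lower query)))
          (["count", "number of", "how many"].any (fun w => PySem.Str.isIn w (PySem.Str.lower query)))
          (["date", "month", "year", "day"].any (fun w => PySem.Str.isIn w (PySem.Str.lower query)))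
          (["group", "by", "category"].any (fun w => PySem.Str.isIn w (PySem.Str.lower query)))
          (["order", "sort", "highest", "lowest"].any (fun w => PySem.Str.isIn w (PySem.Str.lower query)))
          (["where", "filter", "only", "greater", "less"].any (fun w => PySem.Str.isIn w (PySem.Str.lower query)))
          (["greater", "more than", "over"].any (fun w => PySem.Str.isIn w (PySem.Str.lower query)))
          (["less", "under", "below"].any (fun w => PySem.Str.isIn w (PySem.Str.lower query))) := rfl
  have h2 : pvRun (PySem.Str.lower query)
      = pvTableB (["average", "mean", "avg"].any (fun w => PySem.Str.isIn w (PySem.Str.lower query)))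
          (["sum", "total"].any (fun w => PySem.Str.isIn w (PySem.Str.lower query)))
          (["count", "number of", "how many"].any (fun w => PySem.Str.isIn w (PySem.Str.lower query)))
          (["date", "month", "year", "day"].any (fun w => PySem.Str.isIn w (PySem.Str.lower query)))
          (["group", "by", "category"].any (fun w => PySem.Str.isIn w (PySem.Str.lower query)))
          (["order", "sort", "highest", "lowest"].any (fun w => PySem.Str.isIn w (PySem.Str.lower query)))
          (["where", "filter", "only", "greater", "less"].any (fun w => PySem.Str.isIn w (PySem.Str.lower query)))
          (["greater", "more than", "over"].any (fun w => PySem.Str.isIn w (PySem.Str.lower query)))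
          (["less", "under", "below"].any (fun w => PySem.Str.isIn w (PySem.Str.lower query))) := rfl
  rw [h1, h2, pv_tables_eq]
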